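-- pv_equiv track=rewrite | github.com/bzz/tinker-cookbook | tinker_cookbook/recipes/rlvr/patch_env.py | count_context_and_changes
-- ===== SOURCE A (Python) =====
-- def count_context_and_changes(patch: str) -> tuple[int, int]:
--     """Count context lines and change regions in a v4a patch.
--
--     Per the v4a spec, a single hunk can have multiple @@ lines for nested
--     navigation (e.g., @@ class Foo + @@ def bar()). So we count change regions
--     (contiguous +/- blocks) instead of @@ markers.
--
--     Returns (n_context_lines, n_change_regions) where:
--     - n_context_lines: lines starting with " " (space) - unchanged context
--     - n_change_regions: number of separate +/- blocks (each expects ~6 lines context)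
--     """
--     n_context = 0
--     n_change_regions = 0
--     in_change = False
--
--     for line in patch.splitlines():
--         # Skip metadata lines
--         if line.startswith("*** ") or line.startswith("@@"):
--             continue
--
--         if line.startswith(" "):
--             n_context += 1
--             in_change = False
--         elif line.startswith("+") or line.startswith("-"):
--             if not in_change:
--                 n_change_regions += 1
--                 in_change = True
--
--     return n_context, max(1, n_change_regions)
-- ===== SOURCE B (Python) =====
-- from itertools import groupby
--
--
-- def count_context_and_changes(patch: str) -> tuple[int, int]:
--     tokens = []
--     for line in patch.splitlines():
--         if line.startswith("*** ") or line.startswith("@@"):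
--             continue
--         if line.startswith(" "):
--             tokens.append("ctx")
--         elif line.startswith("+") or line.startswith("-"):
--             tokens.append("chg")
--     n_context = sum(1 for t in tokens if t == "ctx")
--     n_change_regions = sum(1 for k, _ in groupby(tokens) if k == "chg")
--     return n_context, max(1, n_change_regions)
-- ===== Notes on version B (the rewrite author's own statement) =====
-- stated objective: alternative
-- what changed: Single stateful scan with an in_change flag is replaced by a two-phase pipeline: tokenize kept lines to ctx/chg labels, then count ctx tokens and count chg runs with itertools.groupby.
import Mathlib
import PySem

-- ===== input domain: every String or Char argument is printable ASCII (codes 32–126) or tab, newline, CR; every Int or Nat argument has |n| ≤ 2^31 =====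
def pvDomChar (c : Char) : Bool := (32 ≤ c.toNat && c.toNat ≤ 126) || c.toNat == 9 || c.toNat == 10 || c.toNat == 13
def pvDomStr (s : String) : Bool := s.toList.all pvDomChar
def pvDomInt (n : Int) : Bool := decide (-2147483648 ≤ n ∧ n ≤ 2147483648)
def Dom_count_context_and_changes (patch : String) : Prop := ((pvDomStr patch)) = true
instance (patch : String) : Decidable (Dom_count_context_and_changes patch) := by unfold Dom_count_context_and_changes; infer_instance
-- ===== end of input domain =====

-- B replaces A's single stateful scan by a tokenize-then-group pipeline (alternative decomposition, same cost).
-- ===== PORT A =====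
def pvAStep (s : Int × Int × Bool) (line : String) : Int × Int × Bool :=
  if PySem.Str.startswith line "*** " || PySem.Str.startswith line "@@" then s
  else if PySem.Str.startswith line " " then (s.1 + 1, s.2.1, false)
  else if PySem.Str.startswith line "+" || PySem.Str.startswith line "-" then
    (if !s.2.2 then (s.1, s.2.1 + 1, true) else s)
  else s

def count_context_and_changes (patch : String) : Int × Int :=
  let st := (PySem.Str.splitlines patch).foldl pvAStep (0, 0, false)
  (st.1, max 1 st.2.1)

-- ===== PORT B =====
def pvTokenOf (line : String) : Option String :=
  if PySem.Str.startswith line "*** " || PySem.Str.startswith line "@@" then none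
  else if PySem.Str.startswith line " " then some "ctx"
  else if PySem.Str.startswith line "+" || PySem.Str.startswith line "-" then some "chg"
  else none

-- groupby over the token list, as a left fold carrying (count of "chg" groups, previous token)
def pvGrpStep (s : Int × Option String) (t : String) : Int × Option String :=
  ((if s.2 ≠ some t && t == "chg" then s.1 + 1 else s.1), some t)

def count_context_and_changes_alt (patch : String) : Int × Int :=
  let tokens := (PySem.Str.splitlines patch).filterMap pvTokenOf
  let nContext : Int := tokens.foldl (fun c t => if t == "ctx" then c + 1 else c) 0
  let nRegions : Int := (tokens.foldl pvGrpStep (0, none)).1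
  (nContext, max 1 nRegions)

-- ===== PRECONDITION & SPEC =====
def Spec_count_context_and_changes (patch : String) (out : Int × Int) : Prop := out = count_context_and_changes_alt patch
instance (patch : String) (out : Int × Int) : Decidable (Spec_count_context_and_changes patch out) := by unfold Spec_count_context_and_changes; infer_instance

-- ===== CLAIM (what is proved, stated in full; the proofs are below) =====
def Claim_equal_count_context_and_changes : Prop := ∀ (patch : String), Dom_count_context_and_changes patch → Spec_count_context_and_changes patch (count_context_and_changes patch)

-- ===== LEMMAS AND PROOFS =====

-- abstract counts over the token list
def pvCtx : List String → Int
  | [] => 0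
  | t :: ts => (if t == "ctx" then 1 else 0) + pvCtx ts

def pvChg : List String → Bool → Int
  | [], _ => 0
  | t :: ts, inch => (if t == "chg" && !inch then 1 else 0) + pvChg ts (t == "chg")

def pvFin : List String → Bool → Bool
  | [], inch => inch
  | t :: ts, _ => pvFin ts (t == "chg")

theorem pvA_fold (lines : List String) : ∀ (n r : Int) (inch : Bool),
    lines.foldl pvAStep (n, r, inch) =
      (n + pvCtx (lines.filterMap pvTokenOf), r + pvChg (lines.filterMap pvTokenOf) inch,
        pvFin (lines.filterMap pvTokenOf) inch) := by
  induction lines with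
  | nil => intro n r inch; simp [pvCtx, pvChg, pvFin]
  | cons line rest ih =>
    intro n r inch
    rw [List.foldl_cons, List.filterMap_cons]
    show List.foldl pvAStep (pvAStep (n, r, inch) line) rest = _
    rw [pvAStep, pvTokenOf]
    by_cases hm : (PySem.Str.startswith line "*** " || PySem.Str.startswith line "@@") = true
    · rw [if_pos hm, if_pos hm, ih]
    · rw [if_neg hm, if_neg hm]
      by_cases hs : (PySem.Str.startswith line " ") = true
      · rw [if_pos hs, if_pos hs, ih]
        simp [pvCtx, pvChg, pvFin]
        omega
      · rw [if_neg hs, if_neg hs]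
        by_cases hc : (PySem.Str.startswith line "+" || PySem.Str.startswith line "-") = true
        · rw [if_pos hc, if_pos hc]
          cases inch
          · rw [if_pos (by simp)]
            rw [ih]
            simp [pvCtx, pvChg, pvFin]
            omega
          · rw [if_neg (by simp)]
            rw [ih]
            simp [pvCtx, pvChg, pvFin]
        · rw [if_neg hc, if_neg hc, ih]

theorem pvB_ctx_fold (ts : List String) : ∀ (c : Int),
    ts.foldl (fun c t => if t == "ctx" then c + 1 else c) c = c + pvCtx ts := by
  induction ts with
  | nil => intro c; simp [pvCtx]
  | cons t rest ih =>
    intro c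
    rw [List.foldl_cons, ih]
    by_cases h : (t == "ctx") = true
    · simp [pvCtx, h]
      omega
    · simp [pvCtx, h]

theorem pvB_grp_fold (ts : List String) : ∀ (c : Int) (prev : Option String),
    (ts.foldl pvGrpStep (c, prev)).1 = c + pvChg ts (prev == some "chg") := by
  induction ts with
  | nil => intro c prev; simp [pvChg]
  | cons t rest ih =>
    intro c prev
    rw [List.foldl_cons]
    show (List.foldl pvGrpStep (pvGrpStep (c, prev) t) rest).1 = _
    rw [pvGrpStep, ih]
    by_cases h : t = "chg"
    · subst h
      by_cases hp : prev = some "chg"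
      · have hpb : (prev == some "chg") = true := by simp [hp]
        simp [hp, pvChg]
      · have hpb : (prev == some "chg") = false := by
          cases prev <;> simp_all
        simp [hp, hpb, pvChg]
        omega
    · have h1 : (t == "chg") = false := by simp [h]
      have h2 : (some t == some "chg") = false := by simp [h]
      simp [pvChg, h1, h2]

theorem pvNoneChg : ((none : Option String) == some "chg") = false := rfl

-- ===== VERDICT (by name: the statement is the Claim_ definition above) =====
theorem count_context_and_changes_spec : Claim_equal_count_context_and_changes := by
  intro patch _
  unfold Spec_count_context_and_changes count_context_and_changes count_context_and_changes_alt
  simp only [pvA_fold, pvB_ctx_fold, pvB_grp_fold, pvNoneChg, zero_add]
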